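-- pv_equiv track=rewrite | github.com/Tomas-Tamantini/advent-of-code-python | models/aoc_2024/a2024_d22/pseudo_random.py | _prices_per_window
-- ===== SOURCE A (Python) =====
-- from typing import Iterable, Iterator
--
-- def _next_pseudo_random(current: int) -> int:
--     mod = 16777216
--     current ^= current << 6
--     current %= mod
--     current ^= current >> 5
--     current ^= current << 11
--     current %= mod
--     return current
--
-- def pseudo_random_sequence(seed: int, num_iterations: int) -> Iterator[int]:
--     current = seed
--     yield current
--     for _ in range(num_iterations):
--         current = _next_pseudo_random(current)
--         yield current
--
-- def _prices_per_window(seed: int, num_iterations: int) -> dict[tuple[int, ...], int]: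
--     window_size = 4
--     prices = dict()
--     sequence = tuple(n % 10 for n in pseudo_random_sequence(seed, num_iterations))
--     differences = tuple((b - a) for a, b in zip(sequence, sequence[1:]))
--     for i in range(num_iterations + 1 - window_size):
--         window = differences[i : i + window_size]
--         if window not in prices:
--             prices[window] = sequence[i + window_size]
--
--     return prices
-- ===== SOURCE B (Python) =====
-- def _prices_per_window(seed: int, num_iterations: int) -> dict[tuple[int, ...], int]:
--     # One streaming pass: compute each new pseudo-random number, its price and
--     # the price difference on the fly, keep only the last four differences,
--     # and record the first price seen for each complete 4-diff window.
--     mod = 16777216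
--     prices = dict()
--     current = seed
--     prev_price = current % 10
--     window = ()
--     for _ in range(num_iterations):
--         current ^= current << 6
--         current %= mod
--         current ^= current >> 5
--         current ^= current << 11
--         current %= mod
--         price = current % 10
--         window = (window + (price - prev_price,))[-4:]
--         prev_price = price
--         if len(window) == 4:
--             prices.setdefault(window, price)
--     return prices
-- ===== Notes on version B (the rewrite author's own statement) =====
-- stated objective: simpler
-- what changed: B fuses A's three staged passes (materialise the whole price sequence, build the whole difference list, then loop over window indices with slicing) into a single streaming loop that keeps only the previous price, the last four differences and the result dict, recording each complete window via setdefault.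
import Mathlib
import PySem

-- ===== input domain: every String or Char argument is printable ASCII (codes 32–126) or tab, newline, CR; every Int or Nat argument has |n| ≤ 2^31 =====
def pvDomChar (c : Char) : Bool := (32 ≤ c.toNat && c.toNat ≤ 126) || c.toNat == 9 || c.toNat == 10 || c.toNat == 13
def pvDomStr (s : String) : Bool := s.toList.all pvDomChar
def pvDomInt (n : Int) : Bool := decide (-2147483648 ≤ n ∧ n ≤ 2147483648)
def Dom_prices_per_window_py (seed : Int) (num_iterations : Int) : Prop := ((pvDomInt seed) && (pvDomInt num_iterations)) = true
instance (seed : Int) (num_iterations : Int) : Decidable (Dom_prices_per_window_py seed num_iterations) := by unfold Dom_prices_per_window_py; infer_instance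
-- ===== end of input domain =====

-- B fuses A's three staged passes (full sequence, full diff list, window loop) into one
-- streaming pass keeping only the last four diffs; objective: simpler (and O(1) extra space).

-- ===== PORT A =====
-- helper _next_pseudo_random
def nextPseudoRandom (current : Int) : Int :=
  let m : Int := 16777216
  let c1 := PySem.Int.bxor current (current <<< 6)
  let c2 := PySem.Int.mod c1 m
  let c3 := PySem.Int.bxor c2 (c2 >>> 5)
  let c4 := PySem.Int.bxor c3 (c3 <<< 11)
  PySem.Int.mod c4 m

-- the generator pseudo_random_sequence, materialised (A consumes it with tuple(...))
def pseudoRandomSequence (seed : Int) (num_iterations : Int) : List Int :=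
  ((PySem.List.pyRange 0 num_iterations 1).foldl
    (fun (st : List Int × Int) _ =>
      let c := nextPseudoRandom st.2
      (st.1 ++ [c], c))
    ([seed], seed)).1

def prices_per_window_py (seed : Int) (num_iterations : Int) : List (List Int × Int) :=
  let window_size : Int := 4
  let sequence := (pseudoRandomSequence seed num_iterations).map (fun n => PySem.Int.mod n 10)
  let differences := (sequence.zip (PySem.List.slice sequence (some 1) none)).map (fun p => p.2 - p.1)
  ((PySem.List.pyRange 0 (num_iterations + 1 - window_size) 1).foldl
    (fun (prices : PySem.Dict (List Int) Int) i =>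
      let window := PySem.List.slice differences (some i) (some (i + window_size))
      if prices.contains window then prices
      else prices.insert window (PySem.List.pyGetD sequence (i + window_size) 0)) -- index i+4 is always in range here (i ≤ n-4, |sequence| = n+1)
    PySem.Dict.empty).items

-- ===== PORT B =====
def prices_per_window_py_alt (seed : Int) (num_iterations : Int) : List (List Int × Int) :=
  let m : Int := 16777216
  (((PySem.List.pyRange 0 num_iterations 1).foldl
    (fun (st : Int × Int × List Int × PySem.Dict (List Int) Int) _ =>
      let (current, prev_price, window, prices) := st
      let c1 := PySem.Int.bxor current (current <<< 6)
      let c2 := PySem.Int.mod c1 m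
      let c3 := PySem.Int.bxor c2 (c2 >>> 5)
      let c4 := PySem.Int.bxor c3 (c3 <<< 11)
      let cur := PySem.Int.mod c4 m
      let price := PySem.Int.mod cur 10
      let w := PySem.List.slice (window ++ [price - prev_price]) (some (-4)) none
      let prices' := if w.length == 4 then prices.setdefault w price else prices
      (cur, price, w, prices'))
    (seed, PySem.Int.mod seed 10, ([] : List Int), PySem.Dict.empty)).2.2.2).items

-- ===== PRECONDITION & SPEC =====
def Spec_prices_per_window_py (seed : Int) (num_iterations : Int) (out : List (List Int × Int)) : Prop := out = prices_per_window_py_alt seed num_iterations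
instance (seed : Int) (num_iterations : Int) (out : List (List Int × Int)) : Decidable (Spec_prices_per_window_py seed num_iterations out) := by unfold Spec_prices_per_window_py; infer_instance

-- ===== CLAIM (what is proved, stated in full; the proofs are below) =====
def Claim_equal_prices_per_window_py : Prop := ∀ (seed : Int) (num_iterations : Int), Dom_prices_per_window_py seed num_iterations → Spec_prices_per_window_py seed num_iterations (prices_per_window_py seed num_iterations)

-- ===== LEMMAS AND PROOFS =====

-- the k-th pseudo-random number, its price, the k-th price difference
def iterR (seed : Int) : Nat → Int
  | 0 => seed
  | k+1 => nextPseudoRandom (iterR seed k)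

def priceR (seed : Int) (k : Nat) : Int := PySem.Int.mod (iterR seed k) 10

def dR (seed : Int) (k : Nat) : Int := priceR seed (k+1) - priceR seed k

def winR (seed : Int) (k : Nat) : List Int :=
  [dR seed k, dR seed (k+1), dR seed (k+2), dR seed (k+3)]

-- the common price dictionary after n steps
def GD (seed : Int) : Nat → PySem.Dict (List Int) Int
  | 0 => PySem.Dict.empty
  | n+1 => if n+1 < 4 then GD seed n
           else (GD seed n).setdefault (winR seed (n-3)) (priceR seed (n+1))

-- the last (at most 4) differences after n steps
def wndR (seed : Int) (n : Nat) : List Int := ((List.range n).map (dR seed)).drop (n-4)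

lemma foldA_eq (seed : Int) (n : Nat) :
    ((PySem.List.pyRange 0 (n : Int) 1).foldl
      (fun (st : List Int × Int) _ =>
        let c := nextPseudoRandom st.2
        (st.1 ++ [c], c))
      ([seed], seed))
    = ((List.range (n+1)).map (iterR seed), iterR seed n) := by
  induction n with
  | zero => simp [PySem.List.pyRange_one_eq_nil (by omega : (0:Int) ≤ 0), iterR]
  | succ k ih =>
    rw [show ((k+1 : Nat) : Int) = (k : Int) + 1 by push_cast; ring,
        PySem.List.pyRange_one_succ_right (by positivity), List.foldl_append, ih]
    simp [List.range_succ, iterR]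

lemma seq_eq (seed : Int) (n : Nat) :
    (pseudoRandomSequence seed (n : Int)).map (fun x => PySem.Int.mod x 10)
    = (List.range (n+1)).map (priceR seed) := by
  unfold pseudoRandomSequence
  rw [foldA_eq, List.map_map]
  rfl

lemma diff_eq (seed : Int) (n : Nat) :
    ((((List.range (n+1)).map (priceR seed)).zip
        (PySem.List.slice ((List.range (n+1)).map (priceR seed)) (some 1) none)).map
      (fun p => p.2 - p.1))
    = (List.range n).map (dR seed) := by
  rw [PySem.List.slice_from_one]
  apply List.ext_getElem
  · simp
  · intro i h1 h2
    simp only [List.getElem_map, List.getElem_zip, List.getElem_tail, List.getElem_range]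
    rfl

lemma win_slice (seed : Int) (n i : Nat) (h : i + 4 ≤ n) :
    PySem.List.slice ((List.range n).map (dR seed)) (some (i : Int)) (some ((i : Int) + 4))
    = winR seed i := by
  rw [show ((i : Int) + 4) = ((i + 4 : Nat) : Int) by push_cast; ring,
      PySem.List.slice_natCast]
  apply List.ext_getElem
  · simp [winR]; omega
  · intro j h1 h2
    simp only [List.getElem_take, List.getElem_drop, List.getElem_map, List.getElem_range]
    have hj : j < 4 := by simp [winR] at h2; omega
    interval_cases j <;> simp [winR]

lemma price_getD (seed : Int) (n i : Nat) (h : i + 4 ≤ n) :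
    PySem.List.pyGetD ((List.range (n+1)).map (priceR seed)) ((i : Int) + 4) 0
    = priceR seed (i + 4) := by
  rw [show ((i : Int) + 4) = ((i + 4 : Nat) : Int) by push_cast; ring,
      PySem.List.pyGetD_natCast]
  rw [List.getD_eq_getElem?_getD]
  simp [show i + 4 < n + 1 by omega]

lemma GD_small (seed : Int) (n : Nat) (h : n < 4) : GD seed n = PySem.Dict.empty := by
  induction n with
  | zero => rfl
  | succ k ih =>
    rw [GD, if_pos h, ih (by omega)]

lemma H_eq_GD (seed : Int) (n : Nat) :
    ((PySem.List.pyRange 0 ((n : Int) + 1 - 4) 1).foldl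
      (fun (pr : PySem.Dict (List Int) Int) i =>
        if pr.contains (winR seed i.toNat) then pr
        else pr.insert (winR seed i.toNat) (priceR seed (i.toNat + 4)))
      PySem.Dict.empty)
    = GD seed n := by
  induction n with
  | zero =>
    have h0 : PySem.List.pyRange 0 (((0:Nat):Int) + 1 - 4) 1 = [] :=
      PySem.List.pyRange_one_eq_nil (by norm_num)
    rw [h0]; rfl
  | succ k ih =>
    by_cases hk : k < 3
    · have h0 : PySem.List.pyRange 0 (((k+1:Nat):Int) + 1 - 4) 1 = [] :=
        PySem.List.pyRange_one_eq_nil (by push_cast; omega)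
      rw [h0, GD_small seed (k+1) (by omega)]
      rfl
    · have hsp : PySem.List.pyRange 0 (((k+1 : Nat) : Int) + 1 - 4) 1
          = PySem.List.pyRange 0 ((k : Int) + 1 - 4) 1 ++ [(k : Int) + 1 - 4] := by
        rw [show ((k+1 : Nat) : Int) + 1 - 4 = ((k : Int) + 1 - 4) + 1 by omega]
        exact PySem.List.pyRange_one_succ_right (by omega)
      rw [hsp, List.foldl_append, ih]
      simp only [List.foldl_cons, List.foldl_nil]
      have ht : ((k : Int) + 1 - 4).toNat = k - 3 := by omega
      rw [ht, show (k - 3) + 4 = k + 1 by omega, GD,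
          if_neg (show ¬(k + 1 < 4) by omega)]
      by_cases hc : (GD seed k).contains (winR seed (k-3)) = true
      · rw [if_pos hc, PySem.Dict.setdefault_of_contains _ _ hc]
      · rw [if_neg hc, PySem.Dict.setdefault_of_not_contains _ _ (by simpa using hc)]

lemma portA_eq (seed : Int) (n : Nat) :
    prices_per_window_py seed (n : Int) = (GD seed n).items := by
  simp only [prices_per_window_py]
  rw [seq_eq, diff_eq]
  rw [PySem.List.foldl_congr_mem _ _
    (fun (pr : PySem.Dict (List Int) Int) i =>
      if pr.contains (winR seed i.toNat) then pr
      else pr.insert (winR seed i.toNat) (priceR seed (i.toNat + 4)))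
    _ ?_]
  · rw [H_eq_GD]
  · intro pr i hi
    rw [PySem.List.mem_pyRange_one] at hi
    have h0 : 0 ≤ i := hi.1
    have h4 : i.toNat + 4 ≤ n := by omega
    have hcast : i = ((i.toNat : Nat) : Int) := by omega
    dsimp only
    rw [hcast, win_slice seed n i.toNat h4, price_getD seed n i.toNat h4]
    simp only [Int.toNat_natCast]

lemma wnd_length (seed : Int) (n : Nat) : (wndR seed n).length = n - (n - 4) := by
  simp [wndR]

lemma wnd_snoc (seed : Int) (n : Nat) :
    wndR seed n ++ [dR seed n] = ((List.range (n+1)).map (dR seed)).drop (n-4) := by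
  rw [List.range_succ, List.map_append,
      List.drop_append_of_le_length (by simp)]
  rfl

lemma wnd_win (seed : Int) (n : Nat) (h : 3 ≤ n) :
    wndR seed (n+1) = winR seed (n-3) := by
  apply List.ext_getElem
  · simp [wndR, winR]; omega
  · intro j h1 h2
    simp only [wndR, List.getElem_drop, List.getElem_map, List.getElem_range]
    have hj : j < 4 := by simp [wndR] at h1; omega
    interval_cases j <;> simp [winR]

lemma foldB_eq (seed : Int) (n : Nat) :
    ((PySem.List.pyRange 0 (n : Int) 1).foldl
      (fun (st : Int × Int × List Int × PySem.Dict (List Int) Int) _ =>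
        let (current, prev_price, window, prices) := st
        let c1 := PySem.Int.bxor current (current <<< 6)
        let c2 := PySem.Int.mod c1 16777216
        let c3 := PySem.Int.bxor c2 (c2 >>> 5)
        let c4 := PySem.Int.bxor c3 (c3 <<< 11)
        let cur := PySem.Int.mod c4 16777216
        let price := PySem.Int.mod cur 10
        let w := PySem.List.slice (window ++ [price - prev_price]) (some (-4)) none
        let prices' := if w.length == 4 then prices.setdefault w price else prices
        (cur, price, w, prices'))
      (seed, PySem.Int.mod seed 10, ([] : List Int), PySem.Dict.empty))
    = (iterR seed n, priceR seed n, wndR seed n, GD seed n) := by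
  induction n with
  | zero =>
    rw [PySem.List.pyRange_one_eq_nil (by omega)]
    simp [iterR, priceR, wndR, GD]
  | succ k ih =>
    rw [show ((k+1 : Nat) : Int) = (k : Int) + 1 by push_cast; ring,
        PySem.List.pyRange_one_succ_right (by positivity), List.foldl_append, ih]
    simp only [List.foldl_cons, List.foldl_nil]
    have hw : PySem.List.slice (wndR seed k ++ [priceR seed (k+1) - priceR seed k]) (some (-4)) none
        = wndR seed (k+1) := by
      rw [show priceR seed (k+1) - priceR seed k = dR seed k from rfl,
          PySem.List.slice_from_neg_ofNat _ 4 (by norm_num), wnd_snoc,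
          List.drop_drop, wndR]
      congr 1
      have := wnd_length seed k
      simp
      omega
    show (iterR seed (k+1), priceR seed (k+1),
        PySem.List.slice (wndR seed k ++ [priceR seed (k+1) - priceR seed k]) (some (-4)) none,
        if (PySem.List.slice (wndR seed k ++ [priceR seed (k+1) - priceR seed k]) (some (-4)) none).length == 4
        then (GD seed k).setdefault
            (PySem.List.slice (wndR seed k ++ [priceR seed (k+1) - priceR seed k]) (some (-4)) none)
            (priceR seed (k+1))
        else GD seed k)
      = (iterR seed (k+1), priceR seed (k+1), wndR seed (k+1), GD seed (k+1))
    rw [hw]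
    by_cases h3 : 3 ≤ k
    · have hlen : (wndR seed (k+1)).length = 4 := by rw [wnd_length]; omega
      rw [if_pos (show ((wndR seed (k+1)).length == 4) = true by simp [hlen]),
          wnd_win seed k h3, GD, if_neg (show ¬(k + 1 < 4) by omega)]
    · have hlen : (wndR seed (k+1)).length = k + 1 := by rw [wnd_length]; omega
      rw [if_neg (show ¬(((wndR seed (k+1)).length == 4) = true) by simp [hlen]; omega),
          GD, if_pos (show k + 1 < 4 by omega)]

lemma portB_eq (seed : Int) (n : Nat) :
    prices_per_window_py_alt seed (n : Int) = (GD seed n).items := by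
  simp only [prices_per_window_py_alt]
  rw [foldB_eq]

lemma portA_neg (seed : Int) (n : Int) (h : n < 0) :
    prices_per_window_py seed n = [] := by
  simp only [prices_per_window_py, pseudoRandomSequence]
  have e1 : PySem.List.pyRange 0 n 1 = [] := PySem.List.pyRange_one_eq_nil (by omega)
  have e2 : PySem.List.pyRange 0 (n + 1 - 4) 1 = [] := PySem.List.pyRange_one_eq_nil (by omega)
  rw [e1, e2]
  rfl

lemma portB_neg (seed : Int) (n : Int) (h : n < 0) :
    prices_per_window_py_alt seed n = [] := by
  simp only [prices_per_window_py_alt]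
  have e1 : PySem.List.pyRange 0 n 1 = [] := PySem.List.pyRange_one_eq_nil (by omega)
  rw [e1]
  rfl

-- ===== VERDICT (by name: the statement is the Claim_ definition above) =====
theorem prices_per_window_py_spec : Claim_equal_prices_per_window_py := by
  intro seed n _
  unfold Spec_prices_per_window_py
  by_cases h : 0 ≤ n
  · have : n = ((n.toNat : Nat) : Int) := by omega
    rw [this, portA_eq, portB_eq]
  · rw [portA_neg seed n (by omega), portB_neg seed n (by omega)]
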